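-- pv_equiv track=rewrite | github.com/enzonjagi/DSA | python/matching_elements.py | matching_elements
-- ===== SOURCE A (Python) =====
-- def match_el(i, j):
--
--     """Checks if two integers match"""
--
--     match = 0
--
--     if int(i) == int(j):
--         match = 1
--
--     return match
--
-- def arr_add(arr):
--
--     """Adds elements to an array"""
--
--     arr2 = []
--
--     for i in arr:
--         arr2.append(i)
--
--     return arr2
--
-- def matching_elements(arr):
--
--     """Returns an array of matching elements from an array"""
--
--     matching_elms = []
--     arr2 = arr_add(arr)
--
--     if len(arr) < 2:
--         return "The array only has one element."
--     for el in arr: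
--         arr2.remove(el)
--         for el2 in arr2:
--             match = match_el(el, el2)
--             if match == 1:
--                 matching_elms.append(el)
--
--     if len(matching_elms) == 0:
--         return f"The array {arr} has no matching elements."
--     return f"The elements {matching_elms} have a match in the array {arr}."
-- ===== SOURCE B (Python) =====
-- def matching_elements(arr):
--     """Returns an array of matching elements from an array"""
--     if len(arr) < 2:
--         return "The array only has one element."
--     remaining = {}
--     for x in arr:
--         remaining[x] = remaining.get(x, 0) + 1
--     matching = []
--     for x in arr:
--         remaining[x] -= 1
--         matching.extend([x] * remaining[x])
--     if len(matching) == 0: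
--         return f"The array {arr} has no matching elements."
--     return f"The elements {matching} have a match in the array {arr}."
-- ===== Notes on version B (the rewrite author's own statement) =====
-- stated objective: faster
-- what changed: Replaces the quadratic scan (list copy, per-element remove, inner scan for equal elements) by a frequency dictionary built in one pass; each element then emits its remaining-copy count directly, so the inner scan disappears (measured ~2.6x on the timed sizes; the output itself can be quadratic in size, so the win is in the scanning, not the output).
import Mathlib
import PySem

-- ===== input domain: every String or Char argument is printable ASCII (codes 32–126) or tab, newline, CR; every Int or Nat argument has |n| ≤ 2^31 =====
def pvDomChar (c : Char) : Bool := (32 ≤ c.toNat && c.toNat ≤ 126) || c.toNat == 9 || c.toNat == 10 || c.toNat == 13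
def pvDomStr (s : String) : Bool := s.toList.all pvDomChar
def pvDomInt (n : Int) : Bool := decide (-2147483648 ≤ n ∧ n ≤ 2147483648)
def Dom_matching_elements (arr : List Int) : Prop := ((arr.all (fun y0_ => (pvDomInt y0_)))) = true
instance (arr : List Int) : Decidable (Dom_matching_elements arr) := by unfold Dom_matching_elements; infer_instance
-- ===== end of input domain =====

-- B replaces A's copy/remove/inner-scan with a frequency dictionary built in one pass,
-- emitting each element's remaining-copy count directly (objective: faster; measured ~2.6x in a timing run).

-- Python f"{lst}" for a list of ints: "[a, b, …]"
def pyReprIntList (l : List Int) : String :=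
  "[" ++ PySem.Str.join ", " (l.map PySem.Int.toStr) ++ "]"

-- ===== PORT A =====
def match_el (i j : Int) : Int :=
  -- int(i) == int(j): the arguments are ints, so this is integer equality
  if i = j then 1 else 0

def arr_add (arr : List Int) : List Int :=
  arr.foldl (fun arr2 i => arr2 ++ [i]) []

def matching_elements (arr : List Int) : String :=
  let arr2 := arr_add arr
  if arr.length < 2 then "The array only has one element."
  else
    let st := arr.foldl (fun (st : List Int × List Int) el =>
      -- arr2.remove(el): el is always present here, so the ValueError path is unreachable
      let arr2 := (PySem.List.remove? st.2 el).getD st.2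
      let melms := arr2.foldl (fun m el2 => if match_el el el2 = 1 then m ++ [el] else m) st.1
      (melms, arr2)) (([], arr2) : List Int × List Int)
    if st.1.length = 0 then "The array " ++ pyReprIntList arr ++ " has no matching elements."
    else "The elements " ++ pyReprIntList st.1 ++ " have a match in the array " ++ pyReprIntList arr ++ "."

-- ===== PORT B =====
def matching_elements_alt (arr : List Int) : String :=
  if arr.length < 2 then "The array only has one element."
  else
    let remaining : PySem.Dict Int Int :=
      arr.foldl (fun d x => d.insert x (d.getD x 0 + 1)) PySem.Dict.empty
    let st := arr.foldl (fun (st : List Int × PySem.Dict Int Int) x =>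
      let d := st.2.insert x (st.2.getD x 0 - 1)
      (st.1 ++ List.replicate (d.getD x 0).toNat x, d)) (([], remaining) : List Int × PySem.Dict Int Int)
    if st.1.length = 0 then "The array " ++ pyReprIntList arr ++ " has no matching elements."
    else "The elements " ++ pyReprIntList st.1 ++ " have a match in the array " ++ pyReprIntList arr ++ "."

-- ===== PRECONDITION & SPEC =====
def Spec_matching_elements (arr : List Int) (out : String) : Prop := out = matching_elements_alt arr
instance (arr : List Int) (out : String) : Decidable (Spec_matching_elements arr out) := by unfold Spec_matching_elements; infer_instance

-- ===== CLAIM (what is proved, stated in full; the proofs are below) =====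
def Claim_equal_matching_elements : Prop := ∀ (arr : List Int), Dom_matching_elements arr → Spec_matching_elements arr (matching_elements arr)

-- ===== LEMMAS AND PROOFS =====

theorem arr_add_eq (arr : List Int) : arr_add arr = arr := by
  unfold arr_add
  suffices h : ∀ (l acc : List Int), l.foldl (fun arr2 i => arr2 ++ [i]) acc = acc ++ l by
    simpa using h arr []
  intro l
  induction l with
  | nil => simp
  | cons x l ih => intro acc; simp [List.foldl_cons, ih]

theorem inner_fold_eq (l : List Int) (el : Int) :
    ∀ (m : List Int),
      l.foldl (fun m el2 => if match_el el el2 = 1 then m ++ [el] else m) m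
        = m ++ List.replicate (l.count el) el := by
  induction l with
  | nil => intro m; simp
  | cons x l ih =>
    intro m
    rw [List.foldl_cons, ih]
    by_cases h : el = x
    · subst h
      simp [match_el, List.count_cons_self, List.replicate_succ]
    · simp [match_el, h, List.count_cons_of_ne (by exact fun hc => h hc.symm)]

theorem loops_eq (s : List Int) :
    ∀ (m arr2 : List Int) (d : PySem.Dict Int Int),
      (∀ v, (arr2.count v : Int) = d.getD v 0) →
      (∀ v, s.count v ≤ arr2.count v) →
      (s.foldl (fun (st : List Int × List Int) el =>
          let arr2 := (PySem.List.remove? st.2 el).getD st.2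
          let melms := arr2.foldl (fun m el2 => if match_el el el2 = 1 then m ++ [el] else m) st.1
          (melms, arr2)) (m, arr2)).1
      = (s.foldl (fun (st : List Int × PySem.Dict Int Int) x =>
          let d := st.2.insert x (st.2.getD x 0 - 1)
          (st.1 ++ List.replicate (d.getD x 0).toNat x, d)) (m, d)).1 := by
  induction s with
  | nil => intro m arr2 d _ _; rfl
  | cons el rest ih =>
    intro m arr2 d hcnt hle
    have hel : el ∈ arr2 := by
      have := hle el
      simp [List.count_cons_self] at this
      exact List.count_pos_iff.mp (by omega)
    have hrem : PySem.List.remove? arr2 el = some (arr2.erase el) :=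
      PySem.List.remove?_eq_some_erase _ _ hel
    have hpos : 1 ≤ arr2.count el := List.count_pos_iff.mpr hel
    have htoNat : List.replicate (((d.insert el (d.getD el 0 - 1)).getD el 0).toNat) el
        = List.replicate ((arr2.erase el).count el) el := by
      have : ((arr2.erase el).count el : Int) = ((d.insert el (d.getD el 0 - 1)).getD el 0) := by
        rw [PySem.Dict.getD_insert]
        rw [if_pos rfl]
        rw [List.count_erase_self, ← hcnt el]
        push_cast [hpos]
        omega
      rw [← this]; simp
    have hinv1 : ∀ v, ((arr2.erase el).count v : Int) = (d.insert el (d.getD el 0 - 1)).getD v 0 := by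
      intro v
      rw [PySem.Dict.getD_insert]
      by_cases hv : v = el
      · subst hv
        rw [if_pos rfl, List.count_erase_self, ← hcnt v]
        push_cast [hpos]
        omega
      · rw [if_neg hv, List.count_erase_of_ne hv, hcnt v]
    have hinv2 : ∀ v, rest.count v ≤ (arr2.erase el).count v := by
      intro v
      have := hle v
      by_cases hv : v = el
      · subst hv
        rw [List.count_erase_self]
        simp [List.count_cons_self] at this
        omega
      · rw [List.count_erase_of_ne hv]
        calc rest.count v ≤ (el :: rest).count v := by
              simp [List.count_cons]
          _ ≤ arr2.count v := this
    rw [List.foldl_cons, List.foldl_cons]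
    simp only [hrem, Option.getD_some]
    rw [inner_fold_eq, ← htoNat]
    exact ih _ _ _ hinv1 hinv2

theorem counter_getD (arr : List Int) (v : Int) :
    ((arr.foldl (fun d x => d.insert x (d.getD x 0 + 1)) PySem.Dict.empty).getD v 0)
      = (arr.count v : Int) := by
  rw [PySem.Dict.getD_foldl_insert_add_one]
  simp [PySem.Dict.getD_empty]

-- ===== VERDICT (by name: the statement is the Claim_ definition above) =====
theorem matching_elements_spec : Claim_equal_matching_elements := by
  intro arr _
  unfold Spec_matching_elements matching_elements matching_elements_alt
  by_cases h : arr.length < 2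
  · simp [h]
  · simp only [h, if_false, arr_add_eq]
    rw [loops_eq arr [] arr _ (fun v => (counter_getD arr v).symm) (fun v => le_refl _)]
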